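-- pv_equiv track=rewrite | github.com/unNomeDaBM/Maturita-probability-calculator | probabilità lettere maturita.py | number_of_day_for_completion
-- ===== SOURCE A (Python) =====
-- ABC = list("abcdefghijklmnopqrstwxyz")
--
-- ELENCO = ["a", "a", "b0", "b", "c", "c", "c", "c", "c", "c", "d", "d", "e", "g", "l", "l0", "m", "r", "r", "r", "s", "s0", "s"]
--
-- def number_of_day_for_completion(starting_letter:str):
--     # Check if the "starting_letter" is even present in the "ELENCO"
--     if ELENCO.count(starting_letter) > 0:
--
--         # Copy the original "ELENCO" and reorder the new copy to start from the "starting_letter"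
--         idx = ELENCO.index(starting_letter)
--         ELENCO_copy = ELENCO.copy()
--         for _ in range(idx):
--             ELENCO_copy.append(ELENCO_copy[0])
--             ELENCO_copy.pop(0)
--
--         # Reverse the list and find the first (last in the original order) subject and its index
--         ELENCO_copy.reverse()
--         for i, person in enumerate(ELENCO_copy):
--             if len(person) > 1:
--                 return len(ELENCO) - i
--
--     # If the "startind_letter" is not present in "ELENCO" it recursively call itself with the next letter of the alphabet
--     else:
--         # Check if it's the last letter of the alphabet; if so, call itself from the first letter of the alphabet
--         if starting_letter == ABC[-1]:
--             n_first_letter = ABC[0]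
--         else:
--             n_first_letter = ABC[ABC.index(starting_letter) + 1]
--
--         return number_of_day_for_completion(n_first_letter)
-- ===== SOURCE B (Python) =====
-- ABC = list("abcdefghijklmnopqrstwxyz")
--
-- ELENCO = ["a", "a", "b0", "b", "c", "c", "c", "c", "c", "c", "d", "d", "e", "g", "l", "l0", "m", "r", "r", "r", "s", "s0", "s"]
--
-- def number_of_day_for_completion(starting_letter: str):
--     # Advance through ABC (wrapping 'z' -> 'a') until a letter present in ELENCO is found.
--     letter = starting_letter
--     while letter not in ELENCO:
--         if letter == ABC[-1]:
--             letter = ABC[0]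
--         else:
--             letter = ABC[ABC.index(letter) + 1]
--     idx = ELENCO.index(letter)
--     n = len(ELENCO)
--     # The answer is the last rotated position holding a multi-char entry, plus one.
--     return max((p - idx) % n for p, x in enumerate(ELENCO) if len(x) > 1) + 1
-- ===== Notes on version B (the rewrite author's own statement) =====
-- stated objective: alternative
-- what changed: Replaces A's recursion with copy/rotate/pop/reverse/scan over ELENCO by an iterative advance through ABC plus a direct closed-form max of (p - idx) % len(ELENCO) over the fixed positions of multi-char entries.
import Mathlib
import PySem

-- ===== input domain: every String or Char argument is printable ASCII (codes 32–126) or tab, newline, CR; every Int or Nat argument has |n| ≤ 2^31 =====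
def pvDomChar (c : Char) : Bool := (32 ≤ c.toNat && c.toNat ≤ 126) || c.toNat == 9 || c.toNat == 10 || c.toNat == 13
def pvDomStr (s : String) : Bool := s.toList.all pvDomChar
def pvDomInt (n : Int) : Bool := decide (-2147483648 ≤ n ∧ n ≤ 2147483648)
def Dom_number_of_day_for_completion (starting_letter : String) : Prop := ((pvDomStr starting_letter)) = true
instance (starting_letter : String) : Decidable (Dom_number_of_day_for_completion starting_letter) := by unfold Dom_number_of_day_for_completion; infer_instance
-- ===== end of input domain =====

-- B replaces A's recursion + list rotation/reversal/scan with a while-style advance and a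
-- direct modular-max over the fixed positions of multi-char entries (objective: alternative).


-- ===== PORT A =====
def pvABC : List String :=
  ["a","b","c","d","e","f","g","h","i","j","k","l","m","n","o","p","q","r","s","t","w","x","y","z"]

def pvELENCO : List String :=
  ["a","a","b0","b","c","c","c","c","c","c","d","d","e","g","l","l0","m","r","r","r","s","s0","s"]

-- ELENCO_copy.append(ELENCO_copy[0]); ELENCO_copy.pop(0)  — one rotation step
def pvRotStep (l : List String) : List String :=
  match l with
  | [] => []            -- unreachable: ELENCO is nonempty (Python would raise IndexError)
  | h :: t => t ++ [h]

-- the reversed-enumerate scan: first multi-char entry, return len(ELENCO) - i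
def pvScanA : List (Int × String) → Int
  | [] => 0             -- unreachable: ELENCO contains multi-char entries (Python returns None)
  | (i, p) :: rest => if PySem.Str.len p > 1 then (23 : Int) - (i : Int) else pvScanA rest

-- A's recursion, with fuel: the Python chain a→b→…→z→a reaches ELENCO within 24 steps
-- whenever it does not raise ValueError; inputs where it raises are outside Pre_.
def pvARec : Nat → String → Int
  | 0, _ => 0
  | Nat.succ fuel, s =>
    if PySem.List.count pvELENCO s > 0 then
      let idx := (PySem.List.index? pvELENCO s).getD 0
      let copy := (List.range idx).foldl (fun l _ => pvRotStep l) pvELENCO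
      pvScanA (PySem.List.enumerate copy.reverse)
    else
      let nxt :=
        if s == "z" then "a"
        else match PySem.List.index? pvABC s with
             | some i => (PySem.List.pyGet? pvABC ((i : Int) + 1)).getD ""
             | none => ""        -- Python raises ValueError here; outside Pre_
      pvARec fuel nxt

def number_of_day_for_completion (starting_letter : String) : Int :=
  pvARec 30 starting_letter

-- ===== PORT B =====
-- while letter not in ELENCO: advance through ABC, wrapping 'z' -> 'a'
def pvAdvance : Nat → String → String
  | 0, s => s
  | Nat.succ fuel, s =>
    if s ∈ pvELENCO then s
    else
      let nxt :=
        if s == "z" then "a"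
        else match PySem.List.index? pvABC s with
             | some i => (PySem.List.pyGet? pvABC ((i : Int) + 1)).getD ""
             | none => ""        -- Python raises ValueError here; outside Pre_
      pvAdvance fuel nxt

def number_of_day_for_completion_alt (starting_letter : String) : Int :=
  let letter := pvAdvance 30 starting_letter
  let idx := ((PySem.List.index? pvELENCO letter).getD 0 : Int)
  let n := (pvELENCO.length : Int)
  (((PySem.List.enumerate pvELENCO).filter (fun pe => PySem.Str.len pe.2 > 1)).foldl
      (fun acc pe => max acc (PySem.Int.mod (pe.1 - idx) n)) (-(10^9))) + 1

-- ===== PRECONDITION & SPEC =====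
-- Pre_ excludes exactly the inputs on which Python A raises ValueError
-- (strings neither in ELENCO nor a letter of ABC, e.g. "u", "v", "A", "").
def Pre_number_of_day_for_completion (starting_letter : String) : Prop :=
  starting_letter ∈ pvELENCO ∨ starting_letter ∈ pvABC
instance (starting_letter : String) : Decidable (Pre_number_of_day_for_completion starting_letter) := by unfold Pre_number_of_day_for_completion; infer_instance

def pvWitness_number_of_day_for_completion : String := "t"

def Spec_number_of_day_for_completion (starting_letter : String) (out : Int) : Prop := out = number_of_day_for_completion_alt starting_letter
instance (starting_letter : String) (out : Int) : Decidable (Spec_number_of_day_for_completion starting_letter out) := by unfold Spec_number_of_day_for_completion; infer_instance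

-- ===== CLAIM (what is proved, stated in full; the proofs are below) =====
def Claim_equal_number_of_day_for_completion : Prop := ∀ (starting_letter : String), Dom_number_of_day_for_completion starting_letter → Pre_number_of_day_for_completion starting_letter → Spec_number_of_day_for_completion starting_letter (number_of_day_for_completion starting_letter)

-- ===== LEMMAS AND PROOFS =====

-- ===== VERDICT (by name: the statement is the Claim_ definition above) =====
theorem number_of_day_for_completion_spec : Claim_equal_number_of_day_for_completion := by
  intro s _ hpre
  unfold Spec_number_of_day_for_completion
  rcases hpre with h | h <;> fin_cases h <;> decide
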